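-- pv_equiv track=rewrite | github.com/miczho/competitive-coding | src/codeforces-1626-c.py | monstersAndSpells
-- ===== SOURCE A (Python) =====
-- def monstersAndSpells(n, k, h):
--     ans = 0
--
--     # time, health
--     tmp = [k[-1], h[-1]]
--     for i in range(n-2, -1, -1):
--         if tmp[0] - k[i] >= tmp[1]:
--             ans += tmp[1] * (tmp[1]+1) // 2
--             tmp = [k[i], h[i]]
--         else:
--             tmp[1] += max(0, h[i] - tmp[1] + tmp[0] - k[i])
--     ans += tmp[1] * (tmp[1]+1) // 2
--
--     return ans
-- ===== SOURCE B (Python) =====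
-- def monstersAndSpells(n, k, h):
--     # Forward interval-merge.  Monster i needs its damage ramp to start no later
--     # than m = k[i] - h[i]; keep a stack of disjoint ramp segments
--     # (min_start, last_time), merging a monster into the top segment whenever its
--     # start lies before that segment's end.  A segment spanning
--     # p = last_time - min_start seconds costs 1 + 2 + ... + p = p*(p+1)//2 mana.
--     segs = []
--
--     def add(ki, hi):
--         m = ki - hi
--         while segs and segs[-1][1] > m:
--             pm, _ = segs.pop()
--             m = min(m, pm)
--         segs.append((m, ki))
--
--     for i in range(n - 1):
--         add(k[i], h[i])
--     add(k[-1], h[-1])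
--
--     return sum((t - m) * (t - m + 1) // 2 for m, t in segs)
-- ===== Notes on version B (the rewrite author's own statement) =====
-- stated objective: alternative
-- what changed: Replaces A's backward scan that rolls a (time, accumulated-health) pair and resets on the '>=' gap test by a forward interval-merge: each monster is pushed as a segment (min_start = k-h, last_time = k) onto an explicit stack, overlapping segments are popped and merged, and each final segment contributes the closed cost p*(p+1)//2 with p = last_time - min_start.
import Mathlib
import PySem

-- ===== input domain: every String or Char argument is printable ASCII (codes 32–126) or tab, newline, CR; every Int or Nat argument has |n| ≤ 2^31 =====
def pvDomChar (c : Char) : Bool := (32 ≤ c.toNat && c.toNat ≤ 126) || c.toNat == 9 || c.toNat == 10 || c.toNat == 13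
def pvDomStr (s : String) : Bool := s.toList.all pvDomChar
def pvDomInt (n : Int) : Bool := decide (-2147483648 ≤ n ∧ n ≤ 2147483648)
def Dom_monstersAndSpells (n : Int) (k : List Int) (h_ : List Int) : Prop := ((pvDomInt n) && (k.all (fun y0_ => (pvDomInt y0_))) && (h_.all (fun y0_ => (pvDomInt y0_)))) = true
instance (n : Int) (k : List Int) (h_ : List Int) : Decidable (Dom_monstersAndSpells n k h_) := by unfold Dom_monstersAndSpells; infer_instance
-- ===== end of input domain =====

-- B replaces A's backward rolling-pair scan by a forward interval-merge over a stack of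
-- segments (min_start, last_time) with a closed per-segment cost; objective: alternative.

-- ===== PORT A =====
-- A's loop body: the if/else on tmp, with k[i]/h[i] via pyGet? (in range under Pre_)
def pvBodyA (k : List Int) (h_ : List Int) (s : Int × Int × Int) (i : Int) : Int × Int × Int :=
  if s.2.1 - (PySem.List.pyGet? k i).getD 0 ≥ s.2.2 then
    (s.1 + PySem.Int.floordiv (s.2.2 * (s.2.2 + 1)) 2,
     (PySem.List.pyGet? k i).getD 0, (PySem.List.pyGet? h_ i).getD 0)
  else
    (s.1, s.2.1,
     s.2.2 + max 0 ((PySem.List.pyGet? h_ i).getD 0 - s.2.2 + s.2.1 - (PySem.List.pyGet? k i).getD 0))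

def monstersAndSpells (n : Int) (k : List Int) (h_ : List Int) : Int :=
  let st := (PySem.List.pyRange (n - 2) (-1) (-1)).foldl (pvBodyA k h_)
    (0, (PySem.List.pyGet? k (-1)).getD 0, (PySem.List.pyGet? h_ (-1)).getD 0)
  st.1 + PySem.Int.floordiv (st.2.2 * (st.2.2 + 1)) 2

-- ===== PORT B =====
-- Source B's while loop inside add(): pop segments whose last_time exceeds the new
-- min_start, merging mins, then push
def pvPopPush (m t : Int) : List (Int × Int) → List (Int × Int)
  | [] => [(m, t)]
  | (pm, pt) :: S => if pt > m then pvPopPush (min m pm) t S else (m, t) :: (pm, pt) :: S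

def monstersAndSpells_alt (n : Int) (k : List Int) (h_ : List Int) : Int :=
  let segs := (PySem.List.pyRange 0 (n - 1) 1).foldl
    (fun S i => pvPopPush ((PySem.List.pyGet? k i).getD 0 - (PySem.List.pyGet? h_ i).getD 0)
      ((PySem.List.pyGet? k i).getD 0) S) []
  let segs2 := pvPopPush ((PySem.List.pyGet? k (-1)).getD 0 - (PySem.List.pyGet? h_ (-1)).getD 0)
    ((PySem.List.pyGet? k (-1)).getD 0) segs
  segs2.foldl (fun tot s => tot + PySem.Int.floordiv ((s.2 - s.1) * (s.2 - s.1 + 1)) 2) 0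

-- ===== PRECONDITION & SPEC =====
-- Pre_ is exactly the inputs on which the Python A returns: both lists nonempty
-- (A reads k[-1], h[-1]) and every loop index n-2 .. 0 inside both lists;
-- A raises IndexError elsewhere.
def Pre_monstersAndSpells (n : Int) (k : List Int) (h_ : List Int) : Prop :=
  k ≠ [] ∧ h_ ≠ [] ∧ n - 1 ≤ (k.length : Int) ∧ n - 1 ≤ (h_.length : Int)
instance (n : Int) (k : List Int) (h_ : List Int) : Decidable (Pre_monstersAndSpells n k h_) := by
  unfold Pre_monstersAndSpells; infer_instance

def pvWitness_monstersAndSpells : Int × List Int × List Int := (2, ([1, 3], [1, 2]))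

def Spec_monstersAndSpells (n : Int) (k : List Int) (h_ : List Int) (out : Int) : Prop := out = monstersAndSpells_alt n k h_
instance (n : Int) (k : List Int) (h_ : List Int) (out : Int) : Decidable (Spec_monstersAndSpells n k h_ out) := by unfold Spec_monstersAndSpells; infer_instance

-- ===== CLAIM (what is proved, stated in full; the proofs are below) =====
def Claim_equal_monstersAndSpells : Prop := ∀ (n : Int) (k : List Int) (h_ : List Int), Dom_monstersAndSpells n k h_ → Pre_monstersAndSpells n k h_ → Spec_monstersAndSpells n k h_ (monstersAndSpells n k h_)

-- ===== LEMMAS AND PROOFS =====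

-- triangle cost
def pvT (p : Int) : Int := PySem.Int.floordiv (p * (p + 1)) 2

-- A's step on an abstract (k,h) pair
def pvStep (x : Int × Int) (s : Int × Int × Int) : Int × Int × Int :=
  if s.2.1 - x.1 ≥ s.2.2 then (s.1 + pvT s.2.2, x.1, x.2)
  else (s.1, s.2.1, s.2.2 + max 0 (x.2 - s.2.2 + s.2.1 - x.1))

-- A's whole backward scan, structurally on the zipped list
def pvRunA : List (Int × Int) → Int × Int × Int
  | [] => (0, 0, 0)
  | [x] => (0, x.1, x.2)
  | x :: y :: xs => pvStep x (pvRunA (y :: xs))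

-- adding one monster on the LEFT touches only the bottom (last) segment of the stack
def pvConsPush (a t : Int) : List (Int × Int) → List (Int × Int)
  | [] => [(a, t)]
  | [(m, u)] => if t > m then [(min m a, u)] else [(m, u), (a, t)]
  | s :: r :: S => s :: pvConsPush a t (r :: S)

def pvStack (xs : List (Int × Int)) : List (Int × Int) :=
  xs.foldl (fun S x => pvPopPush (x.1 - x.2) x.1 S) []

def pvSum (S : List (Int × Int)) : Int :=
  S.foldl (fun tot s => tot + PySem.Int.floordiv ((s.2 - s.1) * (s.2 - s.1 + 1)) 2) 0

-- local commutation of a forward push with a bottom cons-push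
lemma pvPopPush_consPush (S : List (Int × Int)) :
    ∀ m t a u, pvPopPush m t (pvConsPush a u S) = pvConsPush a u (pvPopPush m t S) := by
  induction S with
  | nil =>
    intro m t a u
    simp only [pvConsPush, pvPopPush]
  | cons hd tl ih =>
    intro m t a u
    obtain ⟨pm, pt⟩ := hd
    cases tl with
    | nil =>
      by_cases h1 : u > pm
      · have c1 : pvConsPush a u [(pm, pt)] = [(min pm a, pt)] := by
          simp [pvConsPush, h1]
        by_cases h2 : pt > m
        · have l1 : pvPopPush m t [(min pm a, pt)] = [(min m (min pm a), t)] := by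
            simp [pvPopPush, h2]
          have r1 : pvPopPush m t [(pm, pt)] = [(min m pm, t)] := by
            simp [pvPopPush, h2]
          have r2 : pvConsPush a u [(min m pm, t)] = [(min (min m pm) a, t)] := by
            simp [pvConsPush, show u > min m pm by omega]
          rw [c1, l1, r1, r2]
          simp only [List.cons.injEq, Prod.mk.injEq]
          refine ⟨⟨by omega, by trivial⟩, by trivial⟩
        · have l1 : pvPopPush m t [(min pm a, pt)] = [(m, t), (min pm a, pt)] := by
            simp [pvPopPush, h2]
          have r1 : pvPopPush m t [(pm, pt)] = [(m, t), (pm, pt)] := by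
            simp [pvPopPush, h2]
          have r2 : pvConsPush a u [(m, t), (pm, pt)] = [(m, t), (min pm a, pt)] := by
            simp [pvConsPush, h1]
          rw [c1, l1, r1, r2]
      · have c1 : pvConsPush a u [(pm, pt)] = [(pm, pt), (a, u)] := by
          simp [pvConsPush, h1]
        by_cases h2 : pt > m
        · have l1 : pvPopPush m t [(pm, pt), (a, u)] = pvPopPush (min m pm) t [(a, u)] := by
            simp [pvPopPush, h2]
          have r1 : pvPopPush m t [(pm, pt)] = [(min m pm, t)] := by
            simp [pvPopPush, h2]
          by_cases h3 : u > min m pm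
          · have l2 : pvPopPush (min m pm) t [(a, u)] = [(min (min m pm) a, t)] := by
              simp [pvPopPush, h3]
            have r2 : pvConsPush a u [(min m pm, t)] = [(min (min m pm) a, t)] := by
              simp [pvConsPush, h3]
            rw [c1, l1, l2, r1, r2]
          · have l2 : pvPopPush (min m pm) t [(a, u)] = [(min m pm, t), (a, u)] := by
              simp [pvPopPush, h3]
            have r2 : pvConsPush a u [(min m pm, t)] = [(min m pm, t), (a, u)] := by
              simp [pvConsPush, h3]
            rw [c1, l1, l2, r1, r2]
        · have l1 : pvPopPush m t [(pm, pt), (a, u)] = [(m, t), (pm, pt), (a, u)] := by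
            simp [pvPopPush, h2]
          have r1 : pvPopPush m t [(pm, pt)] = [(m, t), (pm, pt)] := by
            simp [pvPopPush, h2]
          have r2 : pvConsPush a u [(m, t), (pm, pt)] = [(m, t), (pm, pt), (a, u)] := by
            simp [pvConsPush, h1]
          rw [c1, l1, r1, r2]
    | cons r tl' =>
      obtain ⟨r1, r2⟩ := r
      by_cases h1 : pt > m
      · have e1 : pvPopPush m t (pvConsPush a u ((pm, pt) :: (r1, r2) :: tl'))
            = pvPopPush (min m pm) t (pvConsPush a u ((r1, r2) :: tl')) := by
          simp only [pvConsPush, pvPopPush, if_pos h1]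
        have e2 : pvPopPush m t ((pm, pt) :: (r1, r2) :: tl')
            = pvPopPush (min m pm) t ((r1, r2) :: tl') := by
          simp only [pvPopPush, if_pos h1]
        rw [e1, e2, ih]
      · have e1 : pvPopPush m t (pvConsPush a u ((pm, pt) :: (r1, r2) :: tl'))
            = (m, t) :: (pm, pt) :: pvConsPush a u ((r1, r2) :: tl') := by
          simp only [pvConsPush, pvPopPush, if_neg h1]
        have e2 : pvPopPush m t ((pm, pt) :: (r1, r2) :: tl')
            = (m, t) :: (pm, pt) :: (r1, r2) :: tl' := by
          simp only [pvPopPush, if_neg h1]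
        rw [e1, e2]
        rfl

lemma pvFoldl_consPush (xs : List (Int × Int)) :
    ∀ (S : List (Int × Int)) a u,
      xs.foldl (fun S x => pvPopPush (x.1 - x.2) x.1 S) (pvConsPush a u S)
        = pvConsPush a u (xs.foldl (fun S x => pvPopPush (x.1 - x.2) x.1 S) S) := by
  induction xs with
  | nil => intro S a u; rfl
  | cons y ys ih =>
    intro S a u
    simp only [List.foldl_cons]
    rw [pvPopPush_consPush, ih]

lemma pvStack_cons (x : Int × Int) (xs : List (Int × Int)) :
    pvStack (x :: xs) = pvConsPush (x.1 - x.2) x.1 (pvStack xs) := by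
  have : pvPopPush (x.1 - x.2) x.1 ([] : List (Int × Int)) = pvConsPush (x.1 - x.2) x.1 [] := rfl
  simp only [pvStack, List.foldl_cons, this]
  exact pvFoldl_consPush xs [] (x.1 - x.2) x.1

lemma pvConsPush_append (a u : Int) (S : List (Int × Int)) (m t : Int) :
    pvConsPush a u (S ++ [(m, t)]) = S ++ pvConsPush a u [(m, t)] := by
  induction S with
  | nil => simp
  | cons hd tl ih =>
    obtain ⟨p, q⟩ := hd
    cases htl : tl ++ [(m, t)] with
    | nil => simp at htl
    | cons r S' =>
      obtain ⟨r1, r2⟩ := r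
      calc pvConsPush a u ((p, q) :: tl ++ [(m, t)])
          = pvConsPush a u ((p, q) :: (r1, r2) :: S') := by rw [List.cons_append, htl]
        _ = (p, q) :: pvConsPush a u ((r1, r2) :: S') := rfl
        _ = (p, q) :: pvConsPush a u (tl ++ [(m, t)]) := by rw [htl]
        _ = (p, q) :: (tl ++ pvConsPush a u [(m, t)]) := by rw [ih]
        _ = (p, q) :: tl ++ pvConsPush a u [(m, t)] := by simp

lemma pvSum_append_singleton (S : List (Int × Int)) (m t : Int) :
    pvSum (S ++ [(m, t)]) = pvSum S + pvT (t - m) := by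
  simp only [pvSum, pvT, List.foldl_append, List.foldl_cons, List.foldl_nil]

-- main invariant: A's backward state = (sum of closed segments, bottom segment of B's stack)
lemma pvMain (xs : List (Int × Int)) (hne : xs ≠ []) :
    ∃ S m t, pvStack xs = S ++ [(m, t)] ∧ pvRunA xs = (pvSum S, t, t - m) := by
  induction xs with
  | nil => exact absurd rfl hne
  | cons x ys ih =>
    cases ys with
    | nil =>
      refine ⟨[], x.1 - x.2, x.1, ?_, ?_⟩
      · simp [pvStack, pvPopPush]
      · simp only [pvRunA, pvSum, List.foldl_nil, Prod.mk.injEq]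
        refine ⟨by trivial, by trivial, by omega⟩
    | cons y ys' =>
      obtain ⟨S, m, t, hstk, hrun⟩ := ih (by simp)
      rw [pvStack_cons, hstk, pvConsPush_append]
      have hrunc : pvRunA (x :: y :: ys') = pvStep x (pvRunA (y :: ys')) := rfl
      rw [hrunc, hrun]
      by_cases hcond : x.1 > m
      · -- merge into the bottom segment
        refine ⟨S, min m (x.1 - x.2), t, ?_, ?_⟩
        · simp [pvConsPush, hcond]
        · simp only [pvStep]
          rw [if_neg (by omega)]
          simp only [Prod.mk.injEq]
          refine ⟨by trivial, by trivial, by omega⟩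
      · -- close the bottom segment, start a new one
        refine ⟨S ++ [(m, t)], x.1 - x.2, x.1, ?_, ?_⟩
        · simp [pvConsPush, hcond]
        · simp only [pvStep]
          rw [if_pos (by omega), pvSum_append_singleton]
          simp only [Prod.mk.injEq]
          refine ⟨by trivial, by trivial, by omega⟩

-- descending index list = reverse of the ascending one
lemma pvDescEq (m : Nat) :
    (List.range m).map (fun j : Nat => (m : Int) - 1 - j)
      = ((List.range m).map (fun j : Nat => (j : Int))).reverse := by
  induction m with
  | zero => simp
  | succ m ih =>
    have hL : (List.range (m + 1)).map (fun j : Nat => ((m + 1 : Nat) : Int) - 1 - j)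
        = ((m : Nat) : Int) :: (List.range m).map (fun j : Nat => (m : Int) - 1 - j) := by
      rw [List.range_succ_eq_map, List.map_cons, List.map_map]
      have hhead : ((m + 1 : Nat) : Int) - 1 - ((0 : Nat) : Int) = ((m : Nat) : Int) := by
        push_cast; ring
      have htail : (List.range m).map ((fun j : Nat => ((m + 1 : Nat) : Int) - 1 - j) ∘ Nat.succ)
          = (List.range m).map (fun j : Nat => (m : Int) - 1 - j) := by
        apply List.map_congr_left
        intro j _
        simp only [Function.comp]
        push_cast
        ring
      rw [hhead, htail]
    have hR : (List.range (m + 1)).map (fun j : Nat => (j : Int))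
        = (List.range m).map (fun j : Nat => (j : Int)) ++ [((m : Nat) : Int)] := by
      rw [List.range_succ, List.map_append]
      rfl
    rw [hL, hR, List.reverse_append, ih]
    simp

-- pointwise-equal step functions give equal foldr results
lemma pvFoldrCongr {α β : Type} (l : List α) (f g : α → β → β) (b : β)
    (h : ∀ x ∈ l, ∀ s, f x s = g x s) : l.foldr f b = l.foldr g b := by
  induction l with
  | nil => rfl
  | cons x xs ih =>
    simp only [List.foldr_cons]
    rw [h x (by simp), ih (fun y hy s => h y (by simp [hy]) s)]

-- the ascending foldr of A's body is the structural backward scan over the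
-- first m rows of (k, h_) followed by the seed pair s
lemma pvFoldrLemma :
    ∀ (k h_ : List Int) (m : Nat) (s : Int × Int), m ≤ k.length → m ≤ h_.length →
      ((List.range m).map (fun j : Nat => (j : Int))).foldr
          (fun i st => pvBodyA k h_ st i) (0, s.1, s.2)
        = pvRunA ((k.zip h_).take m ++ [s]) := by
  intro k
  induction k with
  | nil =>
    intro h_ m s hm1 hm2
    have hm0 : m = 0 := Nat.le_zero.mp hm1
    subst hm0
    rfl
  | cons a k' ih =>
    intro h_ m s hm1 hm2
    cases m with
    | zero => rfl
    | succ mm =>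
      cases h_ with
      | nil => simp at hm2
      | cons b h' =>
        have hm1' : mm ≤ k'.length := by simpa using hm1
        have hm2' : mm ≤ h'.length := by simpa using hm2
        have hbody : ∀ (j : Nat) (st : Int × Int × Int),
            pvBodyA (a :: k') (b :: h') st (((j : Nat) + 1 : Nat) : Int)
              = pvBodyA k' h' st ((j : Nat) : Int) := by
          intro j st
          have hc : (((j : Nat) + 1 : Nat) : Int) = ((j : Nat) : Int) + 1 := by push_cast; ring
          have hkj : PySem.List.pyGet? (a :: k') (((j : Nat) : Int) + 1)
              = PySem.List.pyGet? k' ((j : Nat) : Int) := PySem.List.pyGet?_cons_succ ..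
          have hhj : PySem.List.pyGet? (b :: h') (((j : Nat) : Int) + 1)
              = PySem.List.pyGet? h' ((j : Nat) : Int) := PySem.List.pyGet?_cons_succ ..
          simp only [pvBodyA, hc, hkj, hhj]
        rw [List.range_succ_eq_map, List.map_cons, List.foldr_cons, List.map_map,
          List.foldr_map]
        have hcongr : (List.range mm).foldr
            (fun (j : Nat) st =>
              pvBodyA (a :: k') (b :: h') st (((fun j : Nat => (j : Int)) ∘ Nat.succ) j))
            (0, s.1, s.2)
            = (List.range mm).foldr
            (fun (j : Nat) st => pvBodyA k' h' st ((j : Nat) : Int)) (0, s.1, s.2) := by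
          apply pvFoldrCongr
          intro j _ st
          exact hbody j st
        have ih' := ih h' mm s hm1' hm2'
        simp only [List.foldr_map] at ih'
        rw [hcongr, ih']
        have hzt : ((a :: k').zip (b :: h')).take (mm + 1) ++ [s]
            = (a, b) :: ((k'.zip h').take mm ++ [s]) := rfl
        rw [hzt]
        have hrun : pvRunA ((a, b) :: ((k'.zip h').take mm ++ [s]))
            = pvStep (a, b) (pvRunA ((k'.zip h').take mm ++ [s])) := by
          cases (k'.zip h').take mm <;> rfl
        rw [hrun]
        have hk0 : PySem.List.pyGet? (a :: k') (((0 : Nat) : Int)) = some a := by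
          simp only [Nat.cast_zero]; exact PySem.List.pyGet?_zero_cons (x := a) (xs := k')
        have hh0 : PySem.List.pyGet? (b :: h') (((0 : Nat) : Int)) = some b := by
          simp only [Nat.cast_zero]; exact PySem.List.pyGet?_zero_cons (x := b) (xs := h')
        simp only [pvBodyA, pvStep, pvT, hk0, hh0, Option.getD_some]

-- the ascending foldl of Source B's add() over indices 0..m-1 builds B's stack over
-- the first m rows of (k, h_)
lemma pvFoldlB (k h_ : List Int) :
    ∀ m : Nat, m ≤ k.length → m ≤ h_.length →
      ((List.range m).map (fun j : Nat => (j : Int))).foldl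
        (fun S i => pvPopPush ((PySem.List.pyGet? k i).getD 0 - (PySem.List.pyGet? h_ i).getD 0)
          ((PySem.List.pyGet? k i).getD 0) S) []
      = pvStack ((k.zip h_).take m) := by
  intro m
  induction m with
  | zero => intro _ _; rfl
  | succ mm ih =>
    intro hm1 hm2
    have hmk : mm < k.length := by omega
    have hmh : mm < h_.length := by omega
    rw [List.range_succ, List.map_append, List.foldl_append,
      ih (by omega) (by omega)]
    have hk : (PySem.List.pyGet? k ((mm : Nat) : Int)).getD 0 = k[mm] := by
      rw [PySem.List.pyGet?_natCast, List.getElem?_eq_getElem hmk]; rfl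
    have hh : (PySem.List.pyGet? h_ ((mm : Nat) : Int)).getD 0 = h_[mm] := by
      rw [PySem.List.pyGet?_natCast, List.getElem?_eq_getElem hmh]; rfl
    have hzm : mm < (k.zip h_).length := by simp [List.length_zip]; omega
    have htake : (k.zip h_).take (mm + 1) = (k.zip h_).take mm ++ [(k[mm], h_[mm])] := by
      rw [List.take_add_one, List.getElem?_eq_getElem hzm]
      simp [List.getElem_zip]
    simp only [List.map_cons, List.map_nil, List.foldl_cons, List.foldl_nil, hk, hh,
      htake, pvStack, List.foldl_append]

-- ===== VERDICT (by name: the statement is the Claim_ definition above) =====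
theorem monstersAndSpells_spec : Claim_equal_monstersAndSpells := by
  intro n k h_ _ hpre
  obtain ⟨hk, hh, hn1, hn2⟩ := hpre
  unfold Spec_monstersAndSpells
  have hgl1 : (PySem.List.pyGet? k (-1)).getD 0 = k.getLast hk := by
    rw [PySem.List.pyGet?_neg_one, List.getLast?_eq_some_getLast hk]
    rfl
  have hgl2 : (PySem.List.pyGet? h_ (-1)).getD 0 = h_.getLast hh := by
    rw [PySem.List.pyGet?_neg_one, List.getLast?_eq_some_getLast hh]
    rfl
  have hm1 : (n - 1).toNat ≤ k.length := by omega
  have hm2 : (n - 1).toNat ≤ h_.length := by omega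
  -- the effective monster list exactly as both programs read it
  set xs : List (Int × Int) :=
    (k.zip h_).take (n - 1).toNat ++ [(k.getLast hk, h_.getLast hh)] with hxs
  -- the descending pyRange is the reverse of the ascending index list
  have hrange : PySem.List.pyRange (n - 2) (-1) (-1)
      = ((List.range (n - 1).toNat).map (fun j : Nat => (j : Int))).reverse := by
    rw [PySem.List.pyRange_neg_one, ← pvDescEq]
    have h1 : (n - 2 - (-1)).toNat = (n - 1).toNat := by omega
    rw [h1]
    apply List.map_congr_left
    intro j hj
    have hjlt : j < (n - 1).toNat := List.mem_range.mp hj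
    have h2 : (((n - 1).toNat : Nat) : Int) = n - 1 := by omega
    rw [h2]
    ring
  -- reduce the A port to pvRunA over xs
  have hA : monstersAndSpells n k h_ = (pvRunA xs).1 + pvT (pvRunA xs).2.2 := by
    simp only [monstersAndSpells, hrange, hgl1, hgl2, List.foldl_reverse]
    rw [show (fun (x : Int) (y : Int × Int × Int) => pvBodyA k h_ y x)
          = (fun i st => pvBodyA k h_ st i) from rfl,
      pvFoldrLemma k h_ ((n - 1).toNat) (k.getLast hk, h_.getLast hh) hm1 hm2]
    rfl
  -- the B port is pvSum of the stack built over the same xs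
  have hrangeB : PySem.List.pyRange 0 (n - 1) 1
      = (List.range (n - 1).toNat).map (fun j : Nat => (j : Int)) := by
    rw [PySem.List.pyRange_one]
    have h1 : (n - 1 - 0).toNat = (n - 1).toNat := by omega
    rw [h1]
    apply List.map_congr_left
    intro j _
    omega
  have hB : monstersAndSpells_alt n k h_ = pvSum (pvStack xs) := by
    simp only [monstersAndSpells_alt, hrangeB, hgl1, hgl2,
      pvFoldlB k h_ ((n - 1).toNat) hm1 hm2]
    simp only [hxs, pvStack, pvSum, List.foldl_append, List.foldl_cons, List.foldl_nil]
  have hzne : xs ≠ [] := by simp [hxs]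
  obtain ⟨S, m, t, hstk, hrun⟩ := pvMain xs hzne
  rw [hA, hB, hstk, hrun, pvSum_append_singleton]
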